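-- pv_equiv track=rewrite | github.com/AIME-JF/trainingplatform | backend/app/services/exam.py | _normalize_exam_status_filters
-- ===== SOURCE A (Python) =====
-- from typing import Any, Dict, List, Optional
--
-- EXAM_STATUS_VALUES = {"upcoming", "active", "ended"}
--
-- def _normalize_exam_status_filters(status: Optional[str]) -> List[str]:
--     if not status:
--         return []
--     normalized: List[str] = []
--     for item in str(status).split(","):
--         value = item.strip()
--         if not value or value in normalized:
--             continue
--         if value not in EXAM_STATUS_VALUES:
--             continue
--         normalized.append(value)
--     return normalized
-- ===== SOURCE B (Python) =====
-- from typing import List, Optional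
--
-- EXAM_STATUS_VALUES = {"upcoming", "active", "ended"}
--
-- _CANDIDATES = ("upcoming", "active", "ended")
--
--
-- def _normalize_exam_status_filters(status: Optional[str]) -> List[str]:
--     if not status:
--         return []
--     tokens = [part.strip() for part in str(status).split(",")]
--     present = [v for v in _CANDIDATES if v in tokens]
--     return sorted(present, key=tokens.index)
-- ===== Notes on version B (the rewrite author's own statement) =====
-- stated objective: alternative
-- what changed: Inverts the iteration: instead of A's token-driven loop that appends to an accumulator while scanning it for duplicates, B filters the fixed 3-candidate status list by membership in the stripped tokens and sorts the survivors by first-occurrence index (sorted with key=tokens.index).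
import Mathlib
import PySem

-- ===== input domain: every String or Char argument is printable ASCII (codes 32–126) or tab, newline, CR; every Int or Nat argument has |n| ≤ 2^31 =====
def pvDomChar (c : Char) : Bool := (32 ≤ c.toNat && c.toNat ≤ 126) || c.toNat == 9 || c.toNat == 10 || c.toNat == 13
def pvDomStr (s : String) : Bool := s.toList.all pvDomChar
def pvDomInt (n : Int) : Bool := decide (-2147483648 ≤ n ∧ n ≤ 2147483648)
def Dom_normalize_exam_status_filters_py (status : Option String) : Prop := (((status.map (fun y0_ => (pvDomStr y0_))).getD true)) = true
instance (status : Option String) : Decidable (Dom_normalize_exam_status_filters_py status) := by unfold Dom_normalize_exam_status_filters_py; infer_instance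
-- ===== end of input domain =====

-- B inverts the iteration: instead of A's token-driven accumulator loop, it filters the fixed
-- 3-candidate status list by membership in the stripped tokens and sorts the survivors by their
-- first-occurrence index (objective: alternative algorithm, same cost).

-- EXAM_STATUS_VALUES = {"upcoming", "active", "ended"}
def EXAM_STATUS_VALUES : PySem.Set String := PySem.Set.ofList ["upcoming", "active", "ended"]

-- ===== PORT A =====
def normalize_exam_status_filters_py (status : Option String) : List String :=
  match status with
  | none => []                              -- 'if not status: return []' (None is falsy)
  | some s =>
    if s == "" then []                      -- '' is falsy too
    else
      ((PySem.Str.split? s ",").getD []).foldl (fun normalized item =>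
        let value := PySem.Str.strip item
        if value == "" || normalized.contains value then normalized
        else if !(PySem.Set.contains EXAM_STATUS_VALUES value) then normalized
        else normalized ++ [value]) []

-- ===== PORT B =====
-- _CANDIDATES = ("upcoming", "active", "ended")
def pvCandidates : List String := ["upcoming", "active", "ended"]

-- tokens.index(v); total form of Python's list.index — only applied to v ∈ tokens, where it is exact
def pvIdx (xs : List String) (v : String) : Nat := (PySem.List.index? xs v).getD 0

def normalize_exam_status_filters_py_alt (status : Option String) : List String :=
  match status with
  | none => []
  | some s =>
    if s == "" then []
    else
      let tokens := ((PySem.Str.split? s ",").getD []).map PySem.Str.strip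
      let present := pvCandidates.filter (fun v => tokens.contains v)
      PySem.List.sorted present (pvIdx tokens)

-- ===== PRECONDITION & SPEC =====
def Spec_normalize_exam_status_filters_py (status : Option String) (out : List String) : Prop := out = normalize_exam_status_filters_py_alt status
instance (status : Option String) (out : List String) : Decidable (Spec_normalize_exam_status_filters_py status out) := by unfold Spec_normalize_exam_status_filters_py; infer_instance

-- ===== CLAIM (what is proved, stated in full; the proofs are below) =====
def Claim_equal_normalize_exam_status_filters_py : Prop := ∀ (status : Option String), Dom_normalize_exam_status_filters_py status → Spec_normalize_exam_status_filters_py status (normalize_exam_status_filters_py status)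

-- ===== LEMMAS AND PROOFS =====

-- A's loop from any accumulator = a guarded PySem.Set.add fold over the stripped-and-filtered tokens
theorem pv_loop_eq (xs : List String) (acc : List String) :
    xs.foldl (fun normalized item =>
        let value := PySem.Str.strip item
        if value == "" || normalized.contains value then normalized
        else if !(PySem.Set.contains EXAM_STATUS_VALUES value) then normalized
        else normalized ++ [value]) acc
    = ((xs.map PySem.Str.strip).filter
        (fun t => PySem.Set.contains EXAM_STATUS_VALUES t)).foldl PySem.Set.add acc := by
  induction xs generalizing acc with
  | nil => rfl
  | cons x xs ih =>
    have hstep : ∀ v : String,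
        (if (v == "" || acc.contains v) = true then acc
         else if (!(PySem.Set.contains EXAM_STATUS_VALUES v)) = true then acc
         else acc ++ [v])
        = if PySem.Set.contains EXAM_STATUS_VALUES v = true
          then PySem.Set.add acc v else acc := by
      intro v
      by_cases hmem : v ∈ (EXAM_STATUS_VALUES : List String)
      · have hne : (v == "") = false := by
          have h3 : v ∈ (["upcoming", "active", "ended"] : List String) := by
            simpa [EXAM_STATUS_VALUES, PySem.Set.mem_ofList] using hmem
          simp only [List.mem_cons, List.not_mem_nil, or_false] at h3
          rcases h3 with h | h | h <;> subst h <;> decide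
        by_cases hacc : v ∈ acc
        · simp [PySem.Set.add, PySem.Set.contains, hmem, hacc, hne]
        · simp [PySem.Set.add, PySem.Set.contains, hmem, hacc, hne]
      · by_cases hacc : v ∈ acc
        · simp [PySem.Set.contains, hmem, hacc]
        · simp [PySem.Set.contains, hmem, hacc]
    simp only [List.foldl_cons, List.map_cons, List.filter_cons, hstep]
    by_cases h : PySem.Set.contains EXAM_STATUS_VALUES (PySem.Str.strip x) = true
    · simp only [h, if_true, List.foldl_cons]
      exact ih _
    · simp only [Bool.not_eq_true] at h
      simp only [h]
      exact ih _

-- filtering commutes with first-kept deduplication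
theorem pv_filter_ofList (l : List String) (q : String → Bool) :
    (PySem.Set.ofList l).filter q = PySem.Set.ofList (l.filter q) := by
  induction l generalizing q with
  | nil => rfl
  | cons x t ih =>
    by_cases hq : q x = true
    · have hL : (PySem.Set.ofList (x :: t)).filter q
          = x :: PySem.Set.ofList (t.filter (fun y => q y && !(y == x))) := by
        rw [PySem.Set.ofList_cons]
        simp only [PySem.Set.discard]
        rw [List.filter_cons, if_pos hq, List.filter_filter, ih]
      have hR : PySem.Set.ofList ((x :: t).filter q)
          = x :: PySem.Set.ofList (t.filter (fun y => !(y == x) && q y)) := by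
        rw [List.filter_cons, if_pos hq, PySem.Set.ofList_cons]
        simp only [PySem.Set.discard]
        rw [← ih q, List.filter_filter, ih]
      rw [hL, hR]
      have hc : (t.filter (fun y => q y && !(y == x)))
          = (t.filter (fun y => !(y == x) && q y)) :=
        List.filter_congr (fun y _ => Bool.and_comm _ _)
      rw [hc]
    · have hL : (PySem.Set.ofList (x :: t)).filter q
          = PySem.Set.ofList (t.filter (fun y => q y && !(y == x))) := by
        rw [PySem.Set.ofList_cons]
        simp only [PySem.Set.discard]
        rw [List.filter_cons, if_neg hq, List.filter_filter, ih]
      have hR : PySem.Set.ofList ((x :: t).filter q)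
          = PySem.Set.ofList (t.filter q) := by
        rw [List.filter_cons, if_neg hq]
      rw [hL, hR]
      have hc : (t.filter (fun y => q y && !(y == x))) = t.filter q := by
        refine List.filter_congr ?_
        intro y _
        by_cases hyx : y = x
        · subst hyx
          simp [Bool.eq_false_iff.mpr hq]
        · simp [hyx]
      rw [hc]

-- first index in a longer list
theorem pv_idx_cons (x a : String) (t : List String) (ha : a ∈ t) (hne : x ≠ a) :
    pvIdx (x :: t) a = pvIdx t a + 1 := by
  obtain ⟨k, hk⟩ := Option.isSome_iff_exists.mp ((PySem.List.index?_isSome_iff t a).mpr ha)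
  rw [pvIdx, pvIdx, PySem.List.index?_cons_of_ne t hne, hk]
  rfl

-- the first-kept dedup of the valid tokens is strictly increasing in first-occurrence index
theorem pv_pairwise (t : List String) (p : String → Bool) :
    (PySem.Set.ofList (t.filter p)).Pairwise (fun a b => pvIdx t a < pvIdx t b) := by
  induction t generalizing p with
  | nil => simp [PySem.Set.ofList]
  | cons x t ih =>
    rw [List.filter_cons]
    by_cases hp : p x = true
    · rw [if_pos hp, PySem.Set.ofList_cons]
      have hdis : (PySem.Set.ofList (t.filter p)).discard x
          = PySem.Set.ofList (t.filter (fun y => !(y == x) && p y)) := by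
        simp only [PySem.Set.discard]
        rw [pv_filter_ofList, List.filter_filter]
      rw [hdis]
      constructor
      · intro b hb
        rw [PySem.Set.mem_ofList, List.mem_filter] at hb
        obtain ⟨hbt, hbp⟩ := hb
        have hbx : x ≠ b := by
          intro h; subst h; simp at hbp
        rw [pv_idx_cons x b t hbt hbx]
        have : pvIdx (x :: t) x = 0 := by
          rw [pvIdx, PySem.List.index?_cons_self]; rfl
        omega
      · have ihp := ih (fun y => !(y == x) && p y)
        refine ihp.imp_of_mem ?_
        intro a b ha hb hlt
        rw [PySem.Set.mem_ofList, List.mem_filter] at ha hb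
        have hax : x ≠ a := by intro h; subst h; simp at ha
        have hbx : x ≠ b := by intro h; subst h; simp at hb
        rw [pv_idx_cons x a t ha.1 hax, pv_idx_cons x b t hb.1 hbx]
        omega
    · rw [if_neg hp]
      refine (ih p).imp_of_mem ?_
      intro a b ha hb hlt
      rw [PySem.Set.mem_ofList, List.mem_filter] at ha hb
      have hax : x ≠ a := by
        intro h; subst h; rw [ha.2] at hp; exact hp rfl
      have hbx : x ≠ b := by
        intro h; subst h; rw [hb.2] at hp; exact hp rfl
      rw [pv_idx_cons x a t ha.1 hax, pv_idx_cons x b t hb.1 hbx]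
      omega

-- ===== VERDICT (by name: the statement is the Claim_ definition above) =====
theorem normalize_exam_status_filters_py_spec : Claim_equal_normalize_exam_status_filters_py := by
  unfold Claim_equal_normalize_exam_status_filters_py
  intro status _
  unfold Spec_normalize_exam_status_filters_py
  unfold normalize_exam_status_filters_py normalize_exam_status_filters_py_alt
  cases status with
  | none => rfl
  | some s =>
    by_cases hs : (s == "") = true
    · simp [hs]
    · simp only [hs]
      rw [pv_loop_eq, ← PySem.Set.ofList_eq_foldl]
      set tokens := ((PySem.Str.split? s ",").getD []).map PySem.Str.strip with htok
      set p : String → Bool := fun t => PySem.Set.contains EXAM_STATUS_VALUES t with hpdef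
      have hperm : (PySem.Set.ofList (tokens.filter p)).Perm
          (pvCandidates.filter (fun v => tokens.contains v)) := by
        rw [List.perm_ext_iff_of_nodup (PySem.Set.nodup_ofList _)
          ((by decide : pvCandidates.Nodup).filter _)]
        intro a
        simp [PySem.Set.mem_ofList, List.mem_filter, hpdef, PySem.Set.contains,
          EXAM_STATUS_VALUES, pvCandidates, and_comm]
      rw [PySem.List.sorted_eq_of_perm_of_pairwise_lt _ _ _ hperm (pv_pairwise tokens p)]
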